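-- pv_equiv track=rewrite | github.com/teilomillet/textpolicy | textpolicy/analysis/emergence_logger.py | _find_gram_spans
-- ===== SOURCE A (Python) =====
-- from typing import Any, Callable, Dict, List, Optional, Union
--
-- def _find_gram_spans(text: str, grams: List[str]) -> List[tuple]:
--     text_l = text.lower()
--     spans: List[tuple] = []
--     for gram in grams:
--         gram_l = gram.strip().lower()
--         if not gram_l:
--             continue
--         start = 0
--         while True:
--             idx = text_l.find(gram_l, start)
--             if idx < 0:
--                 break
--             end = idx + len(gram_l)
--             left_ok = idx == 0 or not text_l[idx - 1].isalnum()
--             right_ok = end >= len(text_l) or not text_l[end].isalnum()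
--             if left_ok and right_ok:
--                 spans.append((idx, end))
--             start = idx + 1
--     return spans
-- ===== SOURCE B (Python) =====
-- from typing import List
--
--
-- def _find_gram_spans(text: str, grams: List[str]) -> List[tuple]:
--     # Single left-to-right scan over word-boundary positions; per-position hash
--     # lookup of the candidate substring for each distinct pattern length;
--     # matches bucketed per pattern, then emitted in the original gram order.
--     text_l = text.lower()
--     n = len(text_l)
--     keys = [g.strip().lower() for g in grams]
--     buckets = {}
--     for k in keys:
--         if k:
--             buckets.setdefault(k, [])
--     lengths = sorted({len(k) for k in buckets})
--     for i in range(n):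
--         if i > 0 and text_l[i - 1].isalnum():
--             continue
--         for L in lengths:
--             end = i + L
--             if end > n:
--                 break
--             if end < n and text_l[end].isalnum():
--                 continue
--             sub = text_l[i:end]
--             if sub in buckets:
--                 buckets[sub].append((i, end))
--     return [sp for k in keys if k for sp in buckets[k]]
-- ===== Notes on version B (the rewrite author's own statement) =====
-- stated objective: faster
-- what changed: Instead of running a separate find-scan over the whole text for every gram, B makes a single left-to-right pass over the text's word-boundary positions, looks up the candidate substring for each distinct pattern length in a hash table of patterns, buckets the matches per pattern (computed once even for duplicate grams), and finally emits the buckets in the original gram order.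
import Mathlib
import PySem

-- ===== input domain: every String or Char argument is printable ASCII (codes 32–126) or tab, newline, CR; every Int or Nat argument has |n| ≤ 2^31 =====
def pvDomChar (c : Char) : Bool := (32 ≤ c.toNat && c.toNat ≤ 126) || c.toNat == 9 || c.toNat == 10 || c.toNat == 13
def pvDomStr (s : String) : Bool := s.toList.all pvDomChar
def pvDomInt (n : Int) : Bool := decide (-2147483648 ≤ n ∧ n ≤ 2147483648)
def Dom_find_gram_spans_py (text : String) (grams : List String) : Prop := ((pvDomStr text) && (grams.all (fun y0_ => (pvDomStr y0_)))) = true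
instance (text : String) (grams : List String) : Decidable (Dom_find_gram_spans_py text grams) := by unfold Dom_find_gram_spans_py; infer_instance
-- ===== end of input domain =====

-- B replaces A's per-gram repeated find-scans over the text by ONE left-to-right pass over the
-- text with a hash table of patterns bucketing the matches (computed once per distinct pattern),
-- emitted in the original gram order; measurably faster when there are many grams.

-- ===== PORT A =====
-- inner 'while True' loop of A: fuel = text length + 1 - start always suffices (start grows each turn)
def pvFindLoopA (tl pl : List Char) : Nat → Int → List (Int × Int) → List (Int × Int)
  | 0, _, spans => spans
  | fuel + 1, start, spans =>
    let idx := PySem.Chars.findFrom tl pl start none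
    if idx < 0 then spans
    else
      let e : Int := idx + pl.length
      let left_ok : Bool := idx == 0 || !(PySem.Chars.isalnum (PySem.List.pyGetD tl (idx - 1) ' '))
      let right_ok : Bool := decide ((tl.length : Int) ≤ e) || !(PySem.Chars.isalnum (PySem.List.pyGetD tl e ' '))
      pvFindLoopA tl pl fuel (idx + 1) (if left_ok && right_ok then spans ++ [(idx, e)] else spans)

def find_gram_spans_py (text : String) (grams : List String) : List (Int × Int) :=
  let tl := PySem.Chars.lower text.toList
  grams.foldl (fun spans gram =>
    let gl := PySem.Chars.lower (PySem.Chars.strip gram.toList)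
    if gl.isEmpty then spans
    else pvFindLoopA tl gl (tl.length + 1) 0 spans) []

-- ===== PORT B =====
-- inner 'for L in lengths' loop of B (break on e > n, continue on alnum right neighbour)
def pvStepB (tl : List Char) (n i : Nat) :
    List Nat → PySem.Dict (List Char) (List (Int × Int)) → PySem.Dict (List Char) (List (Int × Int))
  | [], d => d
  | L :: rest, d =>
    let e := i + L
    if n < e then d
    else if decide (e < n) && PySem.Chars.isalnum (PySem.List.pyGetD tl (e : Int) ' ') then
      pvStepB tl n i rest d
    else
      let sub := PySem.List.slice tl (some (i : Int)) (some (e : Int))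
      let d' := if d.contains sub then d.modify sub [] (· ++ [((i : Int), (e : Int))]) else d
      pvStepB tl n i rest d'

def find_gram_spans_py_alt (text : String) (grams : List String) : List (Int × Int) :=
  let tl := PySem.Chars.lower text.toList
  let n := tl.length
  let keys := grams.map (fun g => PySem.Chars.lower (PySem.Chars.strip g.toList))
  let buckets := keys.foldl (fun d k => if k.isEmpty then d else d.setdefault k []) PySem.Dict.empty
  let lengths := PySem.List.sorted (PySem.Set.ofList (buckets.keys.map List.length)) (fun x => x) false
  let final := (List.range n).foldl (fun d (i : Nat) =>
      if decide (0 < i) && PySem.Chars.isalnum (PySem.List.pyGetD tl ((i : Int) - 1) ' ') then d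
      else pvStepB tl n i lengths d) buckets
  keys.foldl (fun acc k => if k.isEmpty then acc else acc ++ final.getD k []) []

-- ===== PRECONDITION & SPEC =====
def Spec_find_gram_spans_py (text : String) (grams : List String) (out : List (Int × Int)) : Prop := out = find_gram_spans_py_alt text grams
instance (text : String) (grams : List String) (out : List (Int × Int)) : Decidable (Spec_find_gram_spans_py text grams out) := by unfold Spec_find_gram_spans_py; infer_instance

-- ===== CLAIM (what is proved, stated in full; the proofs are below) =====
def Claim_equal_find_gram_spans_py : Prop := ∀ (text : String) (grams : List String), Dom_find_gram_spans_py text grams → Spec_find_gram_spans_py text grams (find_gram_spans_py text grams)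

-- ===== LEMMAS AND PROOFS =====

-- word-boundary predicates and the canonical span list both programs compute
def pvLeft (tl : List Char) (i : Nat) : Bool :=
  (i == 0) || !(PySem.Chars.isalnum (PySem.List.pyGetD tl ((i : Int) - 1) ' '))

def pvRight (tl : List Char) (e : Int) : Bool :=
  decide ((tl.length : Int) ≤ e) || !(PySem.Chars.isalnum (PySem.List.pyGetD tl e ' '))

def pvOk (tl p : List Char) (i : Nat) : Bool :=
  decide (p <+: tl.drop i) && pvLeft tl i && pvRight tl ((i : Int) + (p.length : Int))

def pvSpan (p : List Char) (i : Nat) : Int × Int := ((i : Int), (i : Int) + (p.length : Int))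

def pvSpansFrom (tl p : List Char) (s : Nat) : List (Int × Int) :=
  ((List.range' s (tl.length - s)).filter (pvOk tl p)).map (pvSpan p)

-- occurrence at i (with room) as a slice test
def pvHit (tl p : List Char) (i : Nat) : Bool :=
  decide (i + p.length ≤ tl.length) && pvRight tl ((i : Int) + (p.length : Int))
    && decide (PySem.List.slice tl (some (i : Int)) (some ((i + p.length : Nat) : Int)) = p)

lemma pvOk_eq_pvHit (tl p : List Char) (hp : p ≠ []) (i : Nat) :
    pvOk tl p i = (pvLeft tl i && pvHit tl p i) := by
  unfold pvOk pvHit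
  rw [PySem.List.slice_natCast]
  by_cases hocc : p <+: tl.drop i
  · have htake : p = List.take p.length (List.drop i tl) := List.prefix_iff_eq_take.mp hocc
    have hi : i < tl.length := by
      by_contra h
      push_neg at h
      rw [List.drop_eq_nil_of_le h] at hocc
      exact hp (List.prefix_nil.mp hocc)
    have hlenle : p.length ≤ tl.length - i := by
      have := hocc.length_le
      simpa using this
    have hle : i + p.length ≤ tl.length := by omega
    have hsl : List.take p.length (List.drop i tl) = p := htake.symm
    cases hl : pvLeft tl i <;> cases hr : pvRight tl ((i : Int) + (p.length : Int)) <;>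
      simp [hocc, hsl, hle]
  · by_cases hroom : i + p.length ≤ tl.length
    · have hne : List.take p.length (List.drop i tl) ≠ p := by
        intro he
        apply hocc
        rw [← he]
        exact List.take_prefix _ _
      simp [hocc, hne]
    · simp [hocc, hroom]

-- A's inner loop computes exactly pvSpansFrom
lemma pvFindLoopA_eq (tl p : List Char) (hp : p ≠ []) :
    ∀ (fuel s : Nat) (spans : List (Int × Int)), s ≤ tl.length → tl.length + 1 ≤ fuel + s →
      pvFindLoopA tl p fuel (s : Int) spans = spans ++ pvSpansFrom tl p s := by
  intro fuel
  induction fuel with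
  | zero => intro s spans hs hf; omega
  | succ fuel ih =>
    intro s spans hs hf
    simp only [pvFindLoopA]
    by_cases hneg : PySem.Chars.findFrom tl p (s : Int) none = -1
    · rw [hneg]
      rw [if_pos (by norm_num)]
      have hninf : ¬ p <:+: List.drop s tl :=
        (PySem.Chars.findFrom_natCast_eq_neg_one_iff tl p s hs).mp hneg
      have hnil : pvSpansFrom tl p s = [] := by
        unfold pvSpansFrom
        rw [List.filter_eq_nil_iff.mpr ?_]
        · rfl
        · intro a ha hok
          rw [List.mem_range'_1] at ha
          have hocc : p <+: List.drop a tl := by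
            unfold pvOk at hok
            simp only [Bool.and_eq_true, decide_eq_true_eq] at hok
            exact hok.1.1
          apply hninf
          have hdd : List.drop a tl = List.drop (a - s) (List.drop s tl) := by
            rw [List.drop_drop]
            congr 1
            omega
          rw [hdd] at hocc
          exact hocc.isInfix.trans (List.drop_suffix (a - s) (List.drop s tl)).isInfix
      rw [hnil]
      simp
    · obtain ⟨hsj, hpre, hmin⟩ := PySem.Chars.findFrom_natCast_spec tl p s hs hneg
      set j := PySem.Chars.findFrom tl p (s : Int) none with hj
      have hjge : (0 : Int) ≤ j := le_trans (Int.natCast_nonneg s) hsj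
      set jn := j.toNat with hjn
      have hjcast : (jn : Int) = j := Int.toNat_of_nonneg hjge
      have hlt : jn < tl.length := by
        by_contra h
        push_neg at h
        rw [List.drop_eq_nil_of_le h] at hpre
        exact hp (List.prefix_nil.mp hpre)
      have hsjn : s ≤ jn := by
        have := hsj
        rw [← hjcast] at this
        exact_mod_cast this
      rw [if_neg (by omega)]
      rw [← hjcast]
      have hcast1 : ((jn : Int) + 1) = ((jn + 1 : Nat) : Int) := by push_cast; ring
      rw [hcast1]
      rw [ih (jn + 1) _ (by omega) (by omega)]
      have hleft : (((jn : Int)) == (0 : Int) || !(PySem.Chars.isalnum (PySem.List.pyGetD tl ((jn : Int) - 1) ' '))) = pvLeft tl jn := by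
        unfold pvLeft
        have : (((jn : Int)) == (0 : Int)) = (jn == 0) := by
          simp
        rw [this]
      have hOkjn : pvOk tl p jn = (pvLeft tl jn && pvRight tl ((jn : Int) + (p.length : Int))) := by
        unfold pvOk
        simp [hpre]
      have hsplit : pvSpansFrom tl p s =
          (if pvOk tl p jn then [pvSpan p jn] else []) ++ pvSpansFrom tl p (jn + 1) := by
        unfold pvSpansFrom
        have h1 : List.range' s (tl.length - s) =
            List.range' s (jn - s) ++ List.range' jn (tl.length - jn) := by
          calc List.range' s (tl.length - s) = List.range' s ((jn - s) + (tl.length - jn)) := by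
                congr 1
                omega
            _ = List.range' s (jn - s) ++ List.range' (s + 1 * (jn - s)) (tl.length - jn) :=
                List.range'_append.symm
            _ = List.range' s (jn - s) ++ List.range' jn (tl.length - jn) := by
                congr 2
                omega
        have h2 : (List.range' s (jn - s)).filter (pvOk tl p) = [] := by
          rw [List.filter_eq_nil_iff]
          intro a ha hok
          rw [List.mem_range'_1] at ha
          have hocc : p <+: List.drop a tl := by
            unfold pvOk at hok
            simp only [Bool.and_eq_true, decide_eq_true_eq] at hok
            exact hok.1.1
          exact hmin a ha.1 (by omega) hocc
        have h3 : List.range' jn (tl.length - jn) =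
            jn :: List.range' (jn + 1) (tl.length - (jn + 1)) := by
          rw [show tl.length - jn = (tl.length - (jn + 1)) + 1 by omega, List.range'_succ]
        rw [h1, List.filter_append, h2, h3, List.filter_cons]
        split
        · simp
        · simp
      rw [hsplit, hleft, hOkjn]
      unfold pvRight
      split <;> simp_all [pvSpan]

-- ===== B side =====

lemma pvStepB_contains (tl : List Char) (n i : Nat) (ls : List Nat)
    (d : PySem.Dict (List Char) (List (Int × Int))) (q : List Char) :
    (pvStepB tl n i ls d).contains q = d.contains q := by
  induction ls generalizing d with
  | nil => rfl
  | cons L rest ih =>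
    simp only [pvStepB]
    split
    · rfl
    · split
      · exact ih d
      · set sub := PySem.List.slice tl (some (i : Int)) (some ((i + L : Nat) : Int)) with hsub
        by_cases hcs : d.contains sub = true
        · rw [if_pos hcs, ih]
          rw [PySem.Dict.contains_modify]
          by_cases hq : q = sub
          · subst hq
            simp [hcs]
          · simp [hq]
        · rw [if_neg hcs, ih]

-- effect of B's inner loop on the bucket of a pattern p
lemma pvStepB_getD (tl p : List Char) (i : Nat) (ls : List Nat)
    (hpl : ls.Pairwise (· < ·))
    (d : PySem.Dict (List Char) (List (Int × Int))) (hc : d.contains p = true) :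
    (pvStepB tl tl.length i ls d).getD p [] =
      d.getD p [] ++ (if p.length ∈ ls ∧ pvHit tl p i then [pvSpan p i] else []) := by
  induction ls generalizing d with
  | nil => simp [pvStepB]
  | cons L rest ih =>
    have hL : ∀ L' ∈ rest, L < L' := (List.pairwise_cons.mp hpl).1
    have hpl' : rest.Pairwise (· < ·) := (List.pairwise_cons.mp hpl).2
    simp only [pvStepB]
    split
    · rename_i hbreak
      have hno : ¬ (p.length ∈ L :: rest ∧ pvHit tl p i = true) := by
        rintro ⟨hmem, hhit⟩
        have hge : L ≤ p.length := by
          rcases List.mem_cons.mp hmem with h | h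
          · omega
          · exact le_of_lt (hL _ h)
        unfold pvHit at hhit
        simp only [Bool.and_eq_true, decide_eq_true_eq] at hhit
        omega
      rw [if_neg hno]
      simp
    · split
      · -- continue branch: i+L < n and right neighbour alnum
        rename_i hnb hcont
        simp only [Bool.and_eq_true, decide_eq_true_eq] at hcont
        obtain ⟨h1, h2⟩ := hcont
        rw [ih hpl' d hc]
        congr 1
        by_cases hmem : p.length ∈ rest
        · simp [hmem, List.mem_cons]
        · by_cases hpL : p.length = L
          · have hnle : ¬ ((tl.length : Int) ≤ (i : Int) + (p.length : Int)) := by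
              rw [hpL]
              exact_mod_cast not_le.mpr (by exact_mod_cast h1)
            have h2' : PySem.Chars.isalnum (PySem.List.pyGetD tl ((i : Int) + (p.length : Int)) ' ') = true := by
              rw [hpL]
              rw [show ((i : Int) + (L : Int)) = ((i + L : Nat) : Int) by push_cast; ring]
              exact h2
            have hhit : pvHit tl p i = false := by
              unfold pvHit pvRight
              simp [hnle, h2']
            simp [hhit]
          · simp [hmem, List.mem_cons, hpL]
      · -- process branch
        rename_i hnb hcont
        have hroom : i + L ≤ tl.length := by omega
        set sub := PySem.List.slice tl (some (i : Int)) (some ((i + L : Nat) : Int)) with hsub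
        have hsubeq : sub = List.take L (List.drop i tl) := by
          rw [hsub, PySem.List.slice_natCast, Nat.add_sub_cancel_left]
        have hsublen : sub.length = L := by
          rw [hsubeq, List.length_take, List.length_drop]
          omega
        have hor : tl.length ≤ i + L ∨
            PySem.Chars.isalnum (PySem.List.pyGetD tl ((i + L : Nat) : Int) ' ') = false := by
          by_cases he : i + L < tl.length
          · right
            by_contra hb
            apply hcont
            simp only [Bool.and_eq_true, decide_eq_true_eq]
            exact ⟨he, by simpa using hb⟩
          · left
            omega
        have hc' : (if d.contains sub = true then d.modify sub [] (· ++ [((i : Int), ((i + L : Nat) : Int))]) else d).contains p = true := by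
          split
          · rw [PySem.Dict.contains_modify]
            simp [hc]
          · exact hc
        rw [ih hpl' _ hc']
        by_cases hpL : p.length = L
        · have hnotrest : p.length ∉ rest := fun h => by have := hL _ h; omega
          by_cases hsp : sub = p
          · have hcp : d.contains sub = true := by rw [hsp]; exact hc
            have hhit : pvHit tl p i = true := by
              unfold pvHit pvRight
              have h1 : decide (i + p.length ≤ tl.length) = true := by
                rw [decide_eq_true_eq, hpL]
                exact hroom
              have hrt : (decide ((tl.length : Int) ≤ (i : Int) + (p.length : Int)) ||
                  !PySem.Chars.isalnum (PySem.List.pyGetD tl ((i : Int) + (p.length : Int)) ' ')) = true := by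
                rw [hpL, show ((i : Int) + (L : Int)) = ((i + L : Nat) : Int) by push_cast; ring]
                rcases hor with h | h
                · rw [decide_eq_true (show (tl.length : Int) ≤ ((i + L : Nat) : Int) by exact_mod_cast h)]
                  rw [Bool.true_or]
                · rw [h, Bool.not_false, Bool.or_true]
              have h3 : decide (PySem.List.slice tl (some (i : Int)) (some ((i + p.length : Nat) : Int)) = p) = true := by
                rw [decide_eq_true_eq, hpL, ← hsub]
                exact hsp
              rw [h1, hrt, h3]
              rfl
            rw [if_neg (show ¬ (p.length ∈ rest ∧ pvHit tl p i = true) from fun h => hnotrest h.1)]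
            rw [if_pos (show p.length ∈ L :: rest ∧ pvHit tl p i = true from
              ⟨List.mem_cons.mpr (Or.inl hpL), hhit⟩)]
            rw [if_pos hcp, hsp, PySem.Dict.getD_modify_self]
            simp [pvSpan, hpL]
          · have hgd : (if d.contains sub = true then d.modify sub [] (· ++ [((i : Int), ((i + L : Nat) : Int))]) else d).getD p [] = d.getD p [] := by
              split
              · exact PySem.Dict.getD_modify_of_ne d [] _ (fun h => hsp h.symm)
              · rfl
            rw [hgd]
            have hhit : pvHit tl p i = false := by
              unfold pvHit
              have h3 : decide (PySem.List.slice tl (some (i : Int)) (some ((i + p.length : Nat) : Int)) = p) = false := by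
                rw [decide_eq_false_iff_not, hpL, ← hsub]
                exact fun h => hsp h
              rw [h3]
              simp
            rw [if_neg (show ¬ (p.length ∈ rest ∧ pvHit tl p i = true) from fun h => hnotrest h.1)]
            rw [if_neg (show ¬ (p.length ∈ L :: rest ∧ pvHit tl p i = true) from
              fun h => by rw [hhit] at h; exact Bool.false_ne_true h.2)]
        · have hsubne : sub ≠ p := by
            intro he
            apply hpL
            rw [← he, hsublen]
          have hgd : (if d.contains sub = true then d.modify sub [] (· ++ [((i : Int), ((i + L : Nat) : Int))]) else d).getD p [] = d.getD p [] := by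
            split
            · exact PySem.Dict.getD_modify_of_ne d [] _ (fun h => hsubne h.symm)
            · rfl
          rw [hgd]
          congr 1
          simp [List.mem_cons, hpL]

-- effect of B's outer scan on the bucket of p
lemma pvScan_getD (tl p : List Char) (hp : p ≠ []) (ls : List Nat)
    (hpl : ls.Pairwise (· < ·)) (hlen : p.length ∈ ls) :
    ∀ (is_ : List Nat) (d : PySem.Dict (List Char) (List (Int × Int))), d.contains p = true →
    (is_.foldl (fun d (i : Nat) =>
        if decide (0 < i) && PySem.Chars.isalnum (PySem.List.pyGetD tl ((i : Int) - 1) ' ') then d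
        else pvStepB tl tl.length i ls d) d).getD p [] =
      d.getD p [] ++ (is_.filter (pvOk tl p)).map (pvSpan p) := by
  intro is_
  induction is_ with
  | nil => intro d _; simp
  | cons i rest ih =>
    intro d hc
    simp only [List.foldl_cons]
    rw [List.filter_cons]
    split
    · rename_i hfail
      simp only [Bool.and_eq_true, decide_eq_true_eq] at hfail
      have hok : pvOk tl p i = false := by
        unfold pvOk pvLeft
        have h0 : (i == 0) = false := by
          simp
          omega
        simp [h0, hfail.2]
      rw [ih d hc, if_neg (by simp [hok])]
    · rename_i hfail
      have hl : pvLeft tl i = true := by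
        unfold pvLeft
        by_cases h0 : i = 0
        · simp [h0]
        · have ha : PySem.Chars.isalnum (PySem.List.pyGetD tl ((i : Int) - 1) ' ') = false := by
            by_contra hb
            apply hfail
            simp only [Bool.and_eq_true, decide_eq_true_eq]
            exact ⟨by omega, by simpa using hb⟩
          simp [ha]
      have hokhit : pvOk tl p i = pvHit tl p i := by
        rw [pvOk_eq_pvHit tl p hp i, hl]
        simp
      rw [ih _ (by rw [pvStepB_contains]; exact hc)]
      rw [pvStepB_getD tl p i ls hpl d hc]
      by_cases hok : pvOk tl p i = true
      · rw [if_pos hok, if_pos ⟨hlen, hokhit ▸ hok⟩]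
        simp
      · have hokf : pvOk tl p i = false := by
          simpa using hok
        rw [if_neg hok, if_neg (by rintro ⟨_, hh⟩; rw [hokhit] at hokf; simp [hh] at hokf)]
        simp

-- the initial buckets dict: contains exactly the nonempty keys, every bucket empty
lemma pvBuckets_contains (ks : List (List Char)) :
    ∀ (d : PySem.Dict (List Char) (List (Int × Int))) (k : List Char),
    (ks.foldl (fun d k => if k.isEmpty then d else d.setdefault k []) d).contains k = true ↔
      d.contains k = true ∨ (k ∈ ks ∧ k ≠ []) := by
  induction ks with
  | nil => intro d k; simp
  | cons h t ih =>
    intro d k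
    simp only [List.foldl_cons]
    by_cases hh : h.isEmpty
    · rw [if_pos hh, ih]
      have hhe : h = [] := List.isEmpty_iff.mp hh
      subst hhe
      simp only [List.mem_cons]
      constructor
      · rintro (hd | ⟨hm, hne⟩)
        · exact Or.inl hd
        · exact Or.inr ⟨Or.inr hm, hne⟩
      · rintro (hd | ⟨hm | hm, hne⟩)
        · exact Or.inl hd
        · exact absurd hm hne
        · exact Or.inr ⟨hm, hne⟩
    · rw [if_neg hh, ih]
      have hhe : h ≠ [] := fun e => hh (List.isEmpty_iff.mpr e)
      rw [PySem.Dict.contains_setdefault]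
      simp only [Bool.or_eq_true, beq_iff_eq, List.mem_cons]
      constructor
      · rintro ((hk | hd) | ⟨hm, hne⟩)
        · exact Or.inr ⟨Or.inl hk, hk ▸ hhe⟩
        · exact Or.inl hd
        · exact Or.inr ⟨Or.inr hm, hne⟩
      · rintro (hd | ⟨hm | hm, hne⟩)
        · exact Or.inl (Or.inr hd)
        · exact Or.inl (Or.inl hm)
        · exact Or.inr ⟨hm, hne⟩

lemma pvBuckets_getD (ks : List (List Char)) :
    ∀ (d : PySem.Dict (List Char) (List (Int × Int))) (k : List Char),
    (ks.foldl (fun d k => if k.isEmpty then d else d.setdefault k []) d).getD k [] = d.getD k [] := by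
  induction ks with
  | nil => intro d k; rfl
  | cons h t ih =>
    intro d k
    simp only [List.foldl_cons]
    by_cases hh : h.isEmpty
    · rw [if_pos hh, ih]
    · rw [if_neg hh, ih]
      by_cases hk : k = h
      · subst hk
        exact PySem.Dict.getD_setdefault_self d k [] []
      · rw [PySem.Dict.getD_eq_get?_getD, PySem.Dict.get?_setdefault_of_ne d [] hk,
          ← PySem.Dict.getD_eq_get?_getD]

-- assembling both sides
theorem find_gram_spans_py_eq_alt (text : String) (grams : List String) :
    find_gram_spans_py text grams = find_gram_spans_py_alt text grams := by
  unfold find_gram_spans_py find_gram_spans_py_alt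
  rw [List.foldl_map]
  apply PySem.List.foldl_congr_mem
  intro acc g hg
  beta_reduce
  by_cases he : (PySem.Chars.lower (PySem.Chars.strip g.toList)).isEmpty
  · rw [if_pos he, if_pos he]
  · rw [if_neg he, if_neg he]
    set tl := PySem.Chars.lower text.toList with htl
    set k := PySem.Chars.lower (PySem.Chars.strip g.toList) with hk
    have hkne : k ≠ [] := fun e => he (List.isEmpty_iff.mpr e)
    -- A side
    rw [show (0 : Int) = ((0 : Nat) : Int) by norm_num]
    rw [pvFindLoopA_eq tl k hkne (tl.length + 1) 0 acc (Nat.zero_le _) (by omega)]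
    -- B side
    set keys := grams.map (fun g => PySem.Chars.lower (PySem.Chars.strip g.toList)) with hkeys
    set buckets := keys.foldl (fun d k => if k.isEmpty then d else d.setdefault k []) PySem.Dict.empty with hbuckets
    set lengths := PySem.List.sorted (PySem.Set.ofList (buckets.keys.map List.length)) (fun x => x) false with hlengths
    have hkmem : k ∈ keys := by
      rw [hkeys]
      exact List.mem_map.mpr ⟨g, hg, rfl⟩
    have hcont : buckets.contains k = true := by
      rw [hbuckets]
      rw [pvBuckets_contains keys PySem.Dict.empty k]
      exact Or.inr ⟨hkmem, hkne⟩
    have hpl : lengths.Pairwise (· < ·) := by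
      rw [hlengths]
      exact PySem.List.sorted_ofList_pairwise_lt _
    have hlen : k.length ∈ lengths := by
      rw [hlengths, PySem.List.mem_sorted, PySem.Set.mem_ofList]
      exact List.mem_map.mpr ⟨k, (PySem.Dict.contains_iff_mem_keys buckets k).mp hcont, rfl⟩
    rw [pvScan_getD tl k hkne lengths hpl hlen (List.range tl.length) buckets hcont]
    rw [hbuckets, pvBuckets_getD keys PySem.Dict.empty k, PySem.Dict.getD_empty]
    unfold pvSpansFrom
    rw [List.range_eq_range', Nat.sub_zero]
    simp

-- ===== VERDICT (by name: the statement is the Claim_ definition above) =====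
theorem find_gram_spans_py_spec : Claim_equal_find_gram_spans_py := by
  unfold Claim_equal_find_gram_spans_py
  intro text grams _
  unfold Spec_find_gram_spans_py
  exact find_gram_spans_py_eq_alt text grams
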